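-- pv_equiv track=rewrite | github.com/facebookresearch/fairmotion | fairmotion/viz/body_visualizer.py | get_dfs_order
-- ===== SOURCE A (Python) =====
-- def get_dfs_order(parents_np):
--     stack = []
--
--     def dfs(stack, joint):
--         stack.append(joint)
--         for i in range(len(parents_np)):
--             if parents_np[i] == joint:
--                 dfs(stack, i)
--
--     dfs(stack, 0)
--     return stack
-- ===== SOURCE B (Python) =====
-- def get_dfs_order(parents_np):
--     # Build the children adjacency once, then DFS over it, instead of
--     # rescanning the whole parents array at every visited node.
--     children = {}
--     for i in range(len(parents_np)):
--         children.setdefault(parents_np[i], []).append(i)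
--
--     order = []
--
--     def visit(joint):
--         order.append(joint)
--         for c in children.get(joint, []):
--             visit(c)
--
--     visit(0)
--     return order
-- ===== Notes on version B (the rewrite author's own statement) =====
-- stated objective: alternative
-- what changed: B precomputes a parent->children adjacency dict in one pass and then does a single DFS over those lists, replacing A's rescan of the whole parents array at every visited node.
import Mathlib
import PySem

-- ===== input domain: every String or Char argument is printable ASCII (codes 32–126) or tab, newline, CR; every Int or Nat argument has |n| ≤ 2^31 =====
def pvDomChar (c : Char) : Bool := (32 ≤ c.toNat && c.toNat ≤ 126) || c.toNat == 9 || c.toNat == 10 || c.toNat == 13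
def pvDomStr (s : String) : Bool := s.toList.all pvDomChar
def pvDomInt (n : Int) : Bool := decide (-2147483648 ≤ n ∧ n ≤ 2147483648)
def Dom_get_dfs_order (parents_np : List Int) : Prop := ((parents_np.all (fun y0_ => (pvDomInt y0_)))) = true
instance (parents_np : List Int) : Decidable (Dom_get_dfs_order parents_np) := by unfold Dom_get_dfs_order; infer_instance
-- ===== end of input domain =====

-- B builds the parent->children adjacency dict in one pass and DFSes over it,
-- replacing A's rescan of the whole parents array at every visited node.
-- Both recursions carry a fuel guard (length+1) for totality only; it is never
-- exhausted on inputs satisfying Pre_ (where the Python A returns).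

-- ===== PORT A =====
def pvDfsA (parents_np : List Int) : Nat → List Int → Int → List Int
  | 0, stack, _ => stack
  | fuel+1, stack, joint =>
      (List.range parents_np.length).foldl
        (fun st i =>
          if parents_np.getD i 0 = joint then pvDfsA parents_np fuel st (Int.ofNat i) else st)
        (stack ++ [joint])

def get_dfs_order (parents_np : List Int) : List Int :=
  pvDfsA parents_np (parents_np.length + 1) [] 0

-- ===== PORT B =====
-- children.setdefault(parents_np[i], []).append(i)
def pvChildren (parents_np : List Int) : PySem.Dict Int (List Int) :=
  (List.range parents_np.length).foldl
    (fun d i => d.modify (parents_np.getD i 0) [] (· ++ [Int.ofNat i]))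
    PySem.Dict.empty

def pvDfsB (children : PySem.Dict Int (List Int)) : Nat → List Int → Int → List Int
  | 0, order, _ => order
  | fuel+1, order, joint =>
      (children.getD joint []).foldl
        (fun st c => pvDfsB children fuel st c)
        (order ++ [joint])

def get_dfs_order_alt (parents_np : List Int) : List Int :=
  pvDfsB (pvChildren parents_np) (parents_np.length + 1) [] 0

-- ===== PRECONDITION & SPEC =====
-- one step along the parent chain: i ↦ parents_np[i] while it is an in-range index
def pvStep (parents_np : List Int) (o : Option Nat) : Option Nat :=
  o.bind (fun i =>
    if 0 ≤ parents_np.getD i 0 ∧ parents_np.getD i 0 < (parents_np.length : Int)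
    then some (parents_np.getD i 0).toNat else none)

-- Pre_ excludes exactly the inputs whose parent chain from joint 0 returns to 0
-- (a cycle through the root): there the Python A raises RecursionError.
def Pre_get_dfs_order (parents_np : List Int) : Prop :=
  ∀ k ∈ Finset.Icc 1 parents_np.length, (pvStep parents_np)^[k] (some 0) ≠ some 0
instance (parents_np : List Int) : Decidable (Pre_get_dfs_order parents_np) := by
  unfold Pre_get_dfs_order; infer_instance

def pvWitness_get_dfs_order : List Int := [-1, 0, 1, 1]

def Spec_get_dfs_order (parents_np : List Int) (out : List Int) : Prop := out = get_dfs_order_alt parents_np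
instance (parents_np : List Int) (out : List Int) : Decidable (Spec_get_dfs_order parents_np out) := by unfold Spec_get_dfs_order; infer_instance

-- ===== CLAIM (what is proved, stated in full; the proofs are below) =====
def Claim_equal_get_dfs_order : Prop := ∀ (parents_np : List Int), Dom_get_dfs_order parents_np → Pre_get_dfs_order parents_np → Spec_get_dfs_order parents_np (get_dfs_order parents_np)

-- ===== LEMMAS AND PROOFS =====

-- a guarded fold over xs is the plain fold over the filtered-and-mapped list
theorem pv_foldl_filter_map {α β γ : Type} (p : α → Prop) [DecidablePred p]
    (f : α → β) (g : γ → β → γ) :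
    ∀ (xs : List α) (s : γ),
      xs.foldl (fun st i => if p i then g st (f i) else st) s
        = (((xs.filter (fun i => decide (p i))).map f).foldl g s) := by
  intro xs
  induction xs with
  | nil => intro s; rfl
  | cons a t ih =>
      intro s
      by_cases h : p a <;> simp [List.foldl, h, ih]

-- the adjacency dict built by B lists, for each joint j, exactly the indices
-- i < n with parents_np[i] = j, in increasing order
theorem pv_children_getD (parents_np : List Int) (j : Int) :
    (pvChildren parents_np).getD j []
      = ((List.range parents_np.length).filter
          (fun i => decide (parents_np.getD i 0 = j))).map Int.ofNat := by
  unfold pvChildren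
  have hrw :
      (List.range parents_np.length).foldl
        (fun d i => d.modify (parents_np.getD i 0) [] (· ++ [Int.ofNat i]))
        PySem.Dict.empty
      = ((List.range parents_np.length).map
          (fun i => (parents_np.getD i 0, Int.ofNat i))).foldl
          (fun d q => d.modify q.1 [] (· ++ [q.2])) PySem.Dict.empty := by
    rw [List.foldl_map]
  rw [hrw, PySem.Dict.getD_foldl_modify_append]
  simp only [List.filter_map, List.map_map, Function.comp_def]
  refine congrArg (List.map _) (List.filter_congr ?_)
  intro x _
  exact Bool.beq_eq_decide_eq _ _

-- both DFS recursions agree for every fuel, start list and joint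
theorem pv_dfs_agree (parents_np : List Int) :
    ∀ (fuel : Nat) (stack : List Int) (joint : Int),
      pvDfsA parents_np fuel stack joint
        = pvDfsB (pvChildren parents_np) fuel stack joint := by
  intro fuel
  induction fuel with
  | zero => intro stack joint; rfl
  | succ f ih =>
      intro stack joint
      show (List.range parents_np.length).foldl
            (fun st i =>
              if parents_np.getD i 0 = joint then pvDfsA parents_np f st (Int.ofNat i) else st)
            (stack ++ [joint])
          = ((pvChildren parents_np).getD joint []).foldl
              (fun st c => pvDfsB (pvChildren parents_np) f st c) (stack ++ [joint])
      rw [pv_foldl_filter_map (fun i => parents_np.getD i 0 = joint) Int.ofNat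
            (fun st c => pvDfsA parents_np f st c) (List.range parents_np.length)
            (stack ++ [joint]),
          pv_children_getD parents_np joint]
      have hf : (fun st c => pvDfsA parents_np f st c)
              = (fun st c => pvDfsB (pvChildren parents_np) f st c) :=
        funext fun st => funext fun c => ih st c
      rw [hf]

-- ===== VERDICT (by name: the statement is the Claim_ definition above) =====
theorem get_dfs_order_spec : Claim_equal_get_dfs_order := by
  intro parents_np _ _
  show get_dfs_order parents_np = get_dfs_order_alt parents_np
  unfold get_dfs_order get_dfs_order_alt
  exact pv_dfs_agree parents_np _ [] 0
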